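-- pv_equiv track=rewrite | github.com/andrew128/prngs | mcg.py | get_samples_using_mcg
-- ===== SOURCE A (Python) =====
-- def get_samples_using_mcg(prime, multiplier, seed, num_samples):
--     '''
--     Get pseudorandom samples using a Multiplicative Congruential Generator.
--     Gives a certain number of samples given a larger prime,
--     a multiplier, and a seed.
--     '''
--     output = [seed]
--
--     previous_sample = seed
--     for i in range(num_samples):
--         r_i = (multiplier * previous_sample) % prime
--         previous_sample = r_i
--         output.append(r_i)
--
--     return output
-- ===== SOURCE B (Python) =====
-- def get_samples_using_mcg(prime, multiplier, seed, num_samples):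
--     '''
--     Closed form: the i-th MCG sample is (multiplier**i * seed) mod prime,
--     computed independently per sample with modular exponentiation,
--     instead of carrying the previous sample through a loop.
--     '''
--     return [seed] + [pow(multiplier, i, prime) * seed % prime
--                      for i in range(1, num_samples + 1)]
-- ===== Notes on version B (the rewrite author's own statement) =====
-- stated objective: alternative
-- what changed: Replaced the stateful recurrence carrying previous_sample by a stateless closed form: each sample is computed independently as (multiplier^i * seed) mod prime via modular exponentiation in a comprehension.
-- outside the precondition, e.g. on get_samples_using_mcg(0, 3, 5, 2): A raises ZeroDivisionError, B raises ValueError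
import Mathlib
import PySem

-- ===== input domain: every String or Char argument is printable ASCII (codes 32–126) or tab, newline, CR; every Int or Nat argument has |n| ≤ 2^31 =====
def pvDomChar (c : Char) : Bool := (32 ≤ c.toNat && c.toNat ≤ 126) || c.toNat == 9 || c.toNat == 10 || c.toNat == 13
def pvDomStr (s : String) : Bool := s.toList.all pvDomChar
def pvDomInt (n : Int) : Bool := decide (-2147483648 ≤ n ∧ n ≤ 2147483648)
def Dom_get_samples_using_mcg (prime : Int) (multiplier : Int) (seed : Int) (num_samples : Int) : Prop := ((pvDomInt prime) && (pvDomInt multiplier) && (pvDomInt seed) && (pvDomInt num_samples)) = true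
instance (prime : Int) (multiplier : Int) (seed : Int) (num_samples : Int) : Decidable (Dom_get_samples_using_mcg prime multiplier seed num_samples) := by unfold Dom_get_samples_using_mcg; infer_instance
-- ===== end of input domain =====

-- B replaces the carried-state recurrence by the closed form (multiplier^i * seed) mod prime per sample; objective: alternative (stateless decomposition).

-- ===== PORT A =====
def get_samples_using_mcg (prime : Int) (multiplier : Int) (seed : Int) (num_samples : Int) : List Int :=
  ((PySem.List.pyRange 0 num_samples 1).foldl
      (fun (st : List Int × Int) _ =>
        let r_i := PySem.Int.mod (multiplier * st.2) prime
        (st.1 ++ [r_i], r_i))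
      ([seed], seed)).1

-- ===== PORT B =====
-- i ranges over 1..num_samples so i ≥ 1 and `i.toNat` is exactly Python's nonnegative exponent in pow(multiplier, i, prime).
def get_samples_using_mcg_alt (prime : Int) (multiplier : Int) (seed : Int) (num_samples : Int) : List Int :=
  [seed] ++ (PySem.List.pyRange 1 (num_samples + 1) 1).map
    (fun i => PySem.Int.mod (PySem.Int.powMod multiplier i.toNat prime * seed) prime)

-- ===== PRECONDITION & SPEC =====
-- Pre_ excludes prime = 0 with num_samples > 0, where Python A raises ZeroDivisionError (B raises ValueError there).
def Pre_get_samples_using_mcg (prime : Int) (multiplier : Int) (seed : Int) (num_samples : Int) : Prop :=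
  prime ≠ 0 ∨ num_samples ≤ 0
instance (prime : Int) (multiplier : Int) (seed : Int) (num_samples : Int) : Decidable (Pre_get_samples_using_mcg prime multiplier seed num_samples) := by unfold Pre_get_samples_using_mcg; infer_instance
def pvWitness_get_samples_using_mcg : Int × Int × Int × Int := (7, 3, 5, 4)
def Spec_get_samples_using_mcg (prime : Int) (multiplier : Int) (seed : Int) (num_samples : Int) (out : List Int) : Prop := out = get_samples_using_mcg_alt prime multiplier seed num_samples
instance (prime : Int) (multiplier : Int) (seed : Int) (num_samples : Int) (out : List Int) : Decidable (Spec_get_samples_using_mcg prime multiplier seed num_samples out) := by unfold Spec_get_samples_using_mcg; infer_instance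

-- ===== CLAIM (what is proved, stated in full; the proofs are below) =====
def Claim_equal_get_samples_using_mcg : Prop := ∀ (prime : Int) (multiplier : Int) (seed : Int) (num_samples : Int), Dom_get_samples_using_mcg prime multiplier seed num_samples → Pre_get_samples_using_mcg prime multiplier seed num_samples → Spec_get_samples_using_mcg prime multiplier seed num_samples (get_samples_using_mcg prime multiplier seed num_samples)

-- ===== LEMMAS AND PROOFS =====

-- congruence: reducing the inner factor mod p does not change the product mod p (PySem.Int.mod = Int.fmod definitionally)
theorem pvFmodMulFmod (m x p : Int) : (m * Int.fmod x p).fmod p = (m * x).fmod p := by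
  rw [Int.mul_fmod, Int.mul_fmod m x, Int.fmod_fmod_of_dvd _ dvd_rfl]

-- A's loop body, with the (ignored) index dropped
def pvStep (prime multiplier : Int) (st : List Int × Int) : List Int × Int :=
  let r_i := PySem.Int.mod (multiplier * st.2) prime
  (st.1 ++ [r_i], r_i)

theorem pvFoldlIgnore (prime multiplier : Int) (l : List Int) (st : List Int × Int) :
    l.foldl (fun (st : List Int × Int) _ =>
        let r_i := PySem.Int.mod (multiplier * st.2) prime
        (st.1 ++ [r_i], r_i)) st
      = (pvStep prime multiplier)^[l.length] st := by
  induction l generalizing st with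
  | nil => rfl
  | cons a t ih => simp [List.foldl_cons, Function.iterate_succ_apply, ih, pvStep]

theorem pvIterState (prime multiplier seed : Int) (n : Nat) :
    (pvStep prime multiplier)^[n + 1] ([seed], seed)
      = ([seed] ++ (List.range (n + 1)).map
            (fun j => Int.fmod (multiplier ^ (j + 1) * seed) prime),
         Int.fmod (multiplier ^ (n + 1) * seed) prime) := by
  induction n with
  | zero =>
      simp [pvStep, PySem.Int.mod, List.range_succ]
  | succ k ih =>
      rw [Function.iterate_succ_apply', ih]
      simp only [pvStep, PySem.Int.mod, List.range_succ, List.map_append, List.map_cons,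
        List.map_nil, List.append_assoc]
      have h : (multiplier * Int.fmod (multiplier ^ (k + 1) * seed) prime).fmod prime
          = (multiplier ^ (k + 1 + 1) * seed).fmod prime := by
        rw [pvFmodMulFmod]; ring_nf
      simp [h]

theorem pvAltShape (prime multiplier seed num_samples : Int) :
    get_samples_using_mcg_alt prime multiplier seed num_samples
      = [seed] ++ (List.range num_samples.toNat).map
          (fun j => Int.fmod (multiplier ^ (j + 1) * seed) prime) := by
  unfold get_samples_using_mcg_alt
  rw [PySem.List.pyRange_one]
  have h2 : (num_samples + 1 - 1).toNat = num_samples.toNat := by omega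
  rw [h2, List.map_map]
  congr 1
  apply List.map_congr_left
  intro j _
  have h1 : ((1 : Int) + (j : Int)).toNat = j + 1 := by omega
  simp only [Function.comp_apply, h1, PySem.Int.powMod, PySem.Int.mod]
  rw [Int.mul_comm, pvFmodMulFmod, Int.mul_comm]

-- ===== VERDICT (by name: the statement is the Claim_ definition above) =====
theorem get_samples_using_mcg_spec : Claim_equal_get_samples_using_mcg := by
  intro prime multiplier seed num_samples _ _
  unfold Spec_get_samples_using_mcg get_samples_using_mcg
  rw [pvFoldlIgnore, pvAltShape, PySem.List.length_pyRange_one]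
  have h0 : (num_samples - 0).toNat = num_samples.toNat := by omega
  rw [h0]
  cases hn : num_samples.toNat with
  | zero => simp
  | succ k => rw [pvIterState]
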